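-- pv_equiv track=rewrite | github.com/LongerHV/advent-of-code | aoc/day13_point_of_incidence/part1.py | count_rows_above_reflection
-- ===== SOURCE A (Python) =====
-- def count_rows_above_reflection(mirror: list[str], middlepoint: int | None = None) -> int:
--     if middlepoint == 0:
--         return 0
--     middlepoint = middlepoint or len(mirror) - 1
--     upper, lower = mirror[:middlepoint], mirror[middlepoint:]
--     min_length = min(len(upper), len(lower))
--     if list(reversed(upper))[:min_length] == lower[:min_length]:
--         return middlepoint
--     return count_rows_above_reflection(mirror, middlepoint - 1)
-- ===== SOURCE B (Python) =====
-- def count_rows_above_reflection(mirror: list[str], middlepoint: int | None = None) -> int: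
--     n = len(mirror)
--     m = n - 1 if middlepoint is None else middlepoint
--     while m > 0:
--         k = min(m, n - m)
--         if all(mirror[m - 1 - i] == mirror[m + i] for i in range(k)):
--             return m
--         m -= 1
--     return 0
-- ===== Notes on version B (the rewrite author's own statement) =====
-- stated objective: faster
-- what changed: A recursively rebuilds, reverses and whole-compares list slices at every candidate middlepoint; B is an iterative countdown loop that compares the rows around each candidate pairwise in place with early exit, building no intermediate lists and using no recursion.
-- intended difference: On the empty mirror with middlepoint=None, A returns -1 (len(mirror)-1 underflows to -1 and the empty-slice comparison trivially succeeds) while B returns the intended 0: there are no rows above any reflection of an empty pattern. — e.g. on count_rows_above_reflection([], none): A returns -1, B returns 0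
-- outside the precondition, e.g. on count_rows_above_reflection(['a', 'b', 'b'], -1): A returns -1, B returns 0
import Mathlib
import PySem

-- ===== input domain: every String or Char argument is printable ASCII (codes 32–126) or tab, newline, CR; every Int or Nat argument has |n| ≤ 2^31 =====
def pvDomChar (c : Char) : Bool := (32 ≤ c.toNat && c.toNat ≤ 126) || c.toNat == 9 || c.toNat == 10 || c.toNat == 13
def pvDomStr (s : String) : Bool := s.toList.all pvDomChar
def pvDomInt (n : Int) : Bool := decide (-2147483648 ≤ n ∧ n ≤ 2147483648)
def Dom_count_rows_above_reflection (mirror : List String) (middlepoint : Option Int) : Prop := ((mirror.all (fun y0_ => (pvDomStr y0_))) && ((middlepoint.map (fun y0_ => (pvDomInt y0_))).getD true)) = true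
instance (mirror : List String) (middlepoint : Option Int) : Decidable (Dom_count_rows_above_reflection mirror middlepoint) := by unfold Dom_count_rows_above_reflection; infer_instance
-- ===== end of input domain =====

-- B replaces A's recursive slice/reverse/compare search with an iterative countdown loop that
-- compares rows pairwise in place with early exit, skipping A's per-candidate slice building
-- and reversal (objective: faster; a timing run measured B faster); return values agree on
-- Pre_ outside D_ (the empty-mirror corner, where A returns -1 and B returns 0).

-- ===== PORT A =====
-- the recursion of A, guarded by a fuel counter that provably exceeds the recursion depth
-- (A recurses on middlepoint-1 until the slice comparison succeeds or middlepoint hits 0)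
def pvAGo (mirror : List String) : Nat → Option Int → Int
  | 0, _ => 0
  | fuel + 1, middlepoint =>
    if middlepoint = some 0 then 0
    else
      let m : Int := match middlepoint with
        | none => (mirror.length : Int) - 1
        | some v => if v = 0 then (mirror.length : Int) - 1 else v
      let upper := PySem.List.slice mirror none (some m)
      let lower := PySem.List.slice mirror (some m) none
      let min_length : Nat := min upper.length lower.length
      if PySem.List.slice upper.reverse none (some (min_length : Int)) =
         PySem.List.slice lower none (some (min_length : Int)) then m
      else pvAGo mirror fuel (some (m - 1))

def count_rows_above_reflection (mirror : List String) (middlepoint : Option Int) : Int :=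
  pvAGo mirror
    (match middlepoint with
      | none => 2 * mirror.length + 2
      | some v => (v + mirror.length + 1).toNat + 1)
    middlepoint

-- ===== PORT B =====
-- the while-loop of Source B (count m down, pairwise row comparison with early exit), with the
-- loop counter m.toNat as structural fuel
def pvAltGoF (mirror : List String) (n : Int) : Nat → Int → Int
  | 0, _ => 0
  | fuel + 1, m =>
    if m ≤ 0 then 0
    else
      let k : Int := min m (n - m)
      if (List.range k.toNat).all (fun i =>
          PySem.List.pyGetD mirror (m - 1 - (i : Int)) "" == PySem.List.pyGetD mirror (m + (i : Int)) "")
      then m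
      else pvAltGoF mirror n fuel (m - 1)

def count_rows_above_reflection_alt (mirror : List String) (middlepoint : Option Int) : Int :=
  let n : Int := mirror.length
  let m : Int := match middlepoint with
    | none => n - 1
    | some v => v
  pvAltGoF mirror n m.toNat m

-- ===== PRECONDITION & SPEC =====
-- Pre_ excludes an explicit NEGATIVE middlepoint: a row index is naturally nonnegative, and a
-- negative one only triggers Python negative-slice wraparound in A (A still returns a value
-- there, e.g. -1 on (["a","b","b"], -1), while B's countdown loop returns 0).
def Pre_count_rows_above_reflection (mirror : List String) (middlepoint : Option Int) : Prop :=
  0 ≤ middlepoint.getD 0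
instance (mirror : List String) (middlepoint : Option Int) : Decidable (Pre_count_rows_above_reflection mirror middlepoint) := by unfold Pre_count_rows_above_reflection; infer_instance

def pvWitness_count_rows_above_reflection : List String × Option Int := (["ab", "ab"], none)

-- On the empty mirror with middlepoint=None, A returns -1 (len(mirror)-1 underflows to -1 and
-- the empty-slice comparison trivially succeeds) while B returns the intended 0: no rows lie
-- above any reflection of an empty pattern.
def D_count_rows_above_reflection (mirror : List String) (middlepoint : Option Int) : Prop :=
  mirror = [] ∧ middlepoint = none
instance (mirror : List String) (middlepoint : Option Int) : Decidable (D_count_rows_above_reflection mirror middlepoint) := by unfold D_count_rows_above_reflection; infer_instance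

def Spec_count_rows_above_reflection (mirror : List String) (middlepoint : Option Int) (out : Int) : Prop := ¬ D_count_rows_above_reflection mirror middlepoint → out = count_rows_above_reflection_alt mirror middlepoint
instance (mirror : List String) (middlepoint : Option Int) (out : Int) : Decidable (Spec_count_rows_above_reflection mirror middlepoint out) := by unfold Spec_count_rows_above_reflection; infer_instance

def pvDiffWitness_count_rows_above_reflection : List String × Option Int := ([], none)
def pvDiffWitnessOut_count_rows_above_reflection : Int × Int := (-1, 0)

-- ===== CLAIM (what is proved, stated in full; the proofs are below) =====
def Claim_unchanged_count_rows_above_reflection : Prop := ∀ (mirror : List String) (middlepoint : Option Int), Dom_count_rows_above_reflection mirror middlepoint → Pre_count_rows_above_reflection mirror middlepoint → Spec_count_rows_above_reflection mirror middlepoint (count_rows_above_reflection mirror middlepoint)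
def Claim_changed_count_rows_above_reflection : Prop := Dom_count_rows_above_reflection (pvDiffWitness_count_rows_above_reflection.1) (pvDiffWitness_count_rows_above_reflection.2) ∧ Pre_count_rows_above_reflection (pvDiffWitness_count_rows_above_reflection.1) (pvDiffWitness_count_rows_above_reflection.2) ∧ D_count_rows_above_reflection (pvDiffWitness_count_rows_above_reflection.1) (pvDiffWitness_count_rows_above_reflection.2) ∧ count_rows_above_reflection (pvDiffWitness_count_rows_above_reflection.1) (pvDiffWitness_count_rows_above_reflection.2) = pvDiffWitnessOut_count_rows_above_reflection.1 ∧ count_rows_above_reflection_alt (pvDiffWitness_count_rows_above_reflection.1) (pvDiffWitness_count_rows_above_reflection.2) = pvDiffWitnessOut_count_rows_above_reflection.2 ∧ pvDiffWitnessOut_count_rows_above_reflection.1 ≠ pvDiffWitnessOut_count_rows_above_reflection.2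
def Claim_exact_count_rows_above_reflection : Prop := ∀ (mirror : List String) (middlepoint : Option Int), Dom_count_rows_above_reflection mirror middlepoint → Pre_count_rows_above_reflection mirror middlepoint → D_count_rows_above_reflection mirror middlepoint → count_rows_above_reflection mirror middlepoint ≠ count_rows_above_reflection_alt mirror middlepoint

-- ===== LEMMAS AND PROOFS =====

theorem pv_condAB_core (mirror : List String) (a : Nat) (ha1 : 1 ≤ a) :
    (List.take (min (List.take a mirror).length (List.drop a mirror).length) (List.take a mirror).reverse =
     List.take (min (List.take a mirror).length (List.drop a mirror).length) (List.drop a mirror))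
    ↔ (((List.range (min (a:Int) ((mirror.length : Int) - a)).toNat).all (fun i =>
         PySem.List.pyGetD mirror ((a:Int) - 1 - (i : Int)) "" == PySem.List.pyGetD mirror ((a:Int) + (i : Int)) "")) = true) := by
  have hK : (min (a:Int) ((mirror.length : Int) - a)).toNat = min (min a mirror.length) (mirror.length - a) := by
    omega
  have hlen : (List.take a mirror).length = min a mirror.length := by simp
  have hlend : (List.drop a mirror).length = mirror.length - a := by simp
  rw [hK, hlen, hlend]
  obtain ⟨K, hKdef⟩ : ∃ K, min (min a mirror.length) (mirror.length - a) = K := ⟨_, rfl⟩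
  rw [hKdef]
  rcases Nat.eq_zero_or_pos K with hK0 | hKpos
  · subst hK0; simp
  · have haln : a < mirror.length := by omega
    have hKa : K ≤ a := by omega
    have hKna : K ≤ mirror.length - a := by omega
    have hxb : ∀ i : Nat, i < K → a - 1 - i < mirror.length := by intro i hi; omega
    have hyb : ∀ i : Nat, i < K → a + i < mirror.length := by intro i hi; omega
    have hiff2 : ∀ (i : Nat) (hi : i < K),
        ((PySem.List.pyGetD mirror ((a:Int) - 1 - (i : Int)) "" = PySem.List.pyGetD mirror ((a:Int) + (i : Int)) "")
         ↔ mirror[a - 1 - i]'(hxb i hi) = mirror[a + i]'(hyb i hi)) := by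
      intro i hi
      rw [PySem.List.pyGetD_eq_getElem _ _ (by omega) (by omega),
          PySem.List.pyGetD_eq_getElem _ _ (by omega) (by omega)]
      simp only [show ((a:Int) - 1 - (i:Int)).toNat = a - 1 - i from by omega,
                 show ((a:Int) + (i:Int)).toNat = a + i from by omega]
    constructor
    · intro h
      simp only [List.all_eq_true, List.mem_range, beq_iff_eq]
      intro i hi
      rw [hiff2 i hi]
      have h' : (List.take K (List.take a mirror).reverse)[i]'(by simp [hlen]; omega)
              = (List.take K (List.drop a mirror))[i]'(by simp [hlend]; omega) := by
        simp only [h]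
      simpa [List.getElem_take, List.getElem_reverse, List.getElem_drop, hlen,
             Nat.min_eq_left haln.le] using h'
    · intro h
      simp only [List.all_eq_true, List.mem_range, beq_iff_eq] at h
      apply List.ext_getElem
      · simp [hlen, hlend]; omega
      · intro i h1 h2
        have hi : i < K := by simp at h1; omega
        have := (hiff2 i hi).mp (h i hi)
        simpa [List.getElem_take, List.getElem_reverse, List.getElem_drop, hlen,
               Nat.min_eq_left haln.le] using this

theorem pv_condA_zero (mirror : List String) :
    PySem.List.slice (PySem.List.slice mirror none (some (0:Int))).reverse none
            (some ((min (PySem.List.slice mirror none (some (0:Int))).length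
                        (PySem.List.slice mirror (some (0:Int)) none).length : Nat) : Int)) =
          PySem.List.slice (PySem.List.slice mirror (some (0:Int)) none) none
            (some ((min (PySem.List.slice mirror none (some (0:Int))).length
                        (PySem.List.slice mirror (some (0:Int)) none).length : Nat) : Int)) := by
  rw [PySem.List.slice_to mirror le_rfl]
  simp [PySem.List.slice_to]

-- bridge: slice forms to take/drop forms for 0 ≤ m
theorem pv_condA_eq_condB (mirror : List String) (m : Int) (hm : 1 ≤ m) :
    (PySem.List.slice (PySem.List.slice mirror none (some m)).reverse none
            (some ((min (PySem.List.slice mirror none (some m)).length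
                        (PySem.List.slice mirror (some m) none).length : Nat) : Int)) =
          PySem.List.slice (PySem.List.slice mirror (some m) none) none
            (some ((min (PySem.List.slice mirror none (some m)).length
                        (PySem.List.slice mirror (some m) none).length : Nat) : Int)))
    ↔ (((List.range (min m ((mirror.length : Int) - m)).toNat).all (fun i =>
         PySem.List.pyGetD mirror (m - 1 - (i : Int)) "" == PySem.List.pyGetD mirror (m + (i : Int)) "")) = true) := by
  lift m to Nat using (by omega : 0 ≤ m) with a
  rw [PySem.List.slice_from_natCast, PySem.List.slice_to_natCast,
      PySem.List.slice_to_natCast, PySem.List.slice_to_natCast]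
  exact pv_condAB_core mirror a (by exact_mod_cast hm)

theorem pv_altF_nonpos (mirror : List String) (n : Int) (fb : Nat) (m : Int) (h : m ≤ 0) :
    pvAltGoF mirror n fb m = 0 := by
  cases fb with
  | zero => rfl
  | succ g => show (if m ≤ 0 then (0:Int) else _) = 0; rw [if_pos h]

theorem pv_altF_succ (mirror : List String) (n : Int) (g : Nat) (m : Int) (h : 0 < m) :
    pvAltGoF mirror n (g + 1) m =
      if ((List.range (min m (n - m)).toNat).all (fun i =>
          PySem.List.pyGetD mirror (m - 1 - (i : Int)) "" == PySem.List.pyGetD mirror (m + (i : Int)) "")) = true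
      then m else pvAltGoF mirror n g (m - 1) := by
  show (if m ≤ 0 then (0:Int) else _) = _
  rw [if_neg (by omega)]

theorem pvAGo_zero_arg (mirror : List String) (f : Nat) :
    pvAGo mirror (f + 1) (some 0) = 0 := by
  show (if (some (0:Int)) = some 0 then (0:Int) else _) = 0
  rw [if_pos rfl]

theorem pvAGo_none (mirror : List String) (f : Nat) :
    pvAGo mirror (f + 1) none =
      if (PySem.List.slice (PySem.List.slice mirror none (some ((mirror.length : Int) - 1))).reverse none
        (some ((min (PySem.List.slice mirror none (some ((mirror.length : Int) - 1))).length
                    (PySem.List.slice mirror (some ((mirror.length : Int) - 1)) none).length : Nat) : Int)) =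
      PySem.List.slice (PySem.List.slice mirror (some ((mirror.length : Int) - 1)) none) none
        (some ((min (PySem.List.slice mirror none (some ((mirror.length : Int) - 1))).length
                    (PySem.List.slice mirror (some ((mirror.length : Int) - 1)) none).length : Nat) : Int)))
      then (mirror.length : Int) - 1
      else pvAGo mirror f (some ((mirror.length : Int) - 1 - 1)) := rfl

theorem pvAGo_some (mirror : List String) (f : Nat) (v : Int) (hv : v ≠ 0) :
    pvAGo mirror (f + 1) (some v) =
      if (PySem.List.slice (PySem.List.slice mirror none (some (v))).reverse none
        (some ((min (PySem.List.slice mirror none (some (v))).length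
                    (PySem.List.slice mirror (some (v)) none).length : Nat) : Int)) =
      PySem.List.slice (PySem.List.slice mirror (some (v)) none) none
        (some ((min (PySem.List.slice mirror none (some (v))).length
                    (PySem.List.slice mirror (some (v)) none).length : Nat) : Int)))
      then v
      else pvAGo mirror f (some (v - 1)) := by
  show (if some v = some (0:Int) then (0:Int) else _) = _
  rw [if_neg (by simp [hv])]
  simp only [if_neg hv]

theorem pv_loopAB (mirror : List String) : ∀ (kk : Nat) (m : Int), m.toNat ≤ kk →
    ∀ (fa fb : Nat), 0 ≤ m → m.toNat < fa → m.toNat ≤ fb →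
    pvAGo mirror fa (some m) = pvAltGoF mirror mirror.length fb m := by
  intro kk
  induction kk with
  | zero =>
    intro m hk fa fb h0 hfa hfb
    have hm : m = 0 := by omega
    subst hm
    obtain ⟨f, rfl⟩ : ∃ f, fa = f + 1 := ⟨fa - 1, by omega⟩
    rw [pvAGo_zero_arg, pv_altF_nonpos mirror _ fb 0 le_rfl]
  | succ kk ih =>
    intro m hk fa fb h0 hfa hfb
    by_cases hm0 : m = 0
    · subst hm0
      obtain ⟨f, rfl⟩ : ∃ f, fa = f + 1 := ⟨fa - 1, by omega⟩
      rw [pvAGo_zero_arg, pv_altF_nonpos mirror _ fb 0 le_rfl]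
    · obtain ⟨f, rfl⟩ : ∃ f, fa = f + 1 := ⟨fa - 1, by omega⟩
      obtain ⟨g, rfl⟩ : ∃ g, fb = g + 1 := ⟨fb - 1, by omega⟩
      rw [pvAGo_some mirror f m hm0, pv_altF_succ mirror _ g m (by omega)]
      by_cases hc : (PySem.List.slice (PySem.List.slice mirror none (some (m))).reverse none
        (some ((min (PySem.List.slice mirror none (some (m))).length
                    (PySem.List.slice mirror (some (m)) none).length : Nat) : Int)) =
      PySem.List.slice (PySem.List.slice mirror (some (m)) none) none
        (some ((min (PySem.List.slice mirror none (some (m))).length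
                    (PySem.List.slice mirror (some (m)) none).length : Nat) : Int)))
      · rw [if_pos hc, if_pos ((pv_condA_eq_condB mirror m (by omega)).mp hc)]
      · rw [if_neg hc, if_neg (fun hb => hc ((pv_condA_eq_condB mirror m (by omega)).mpr hb))]
        exact ih (m - 1) (by omega) f g (by omega) (by omega) (by omega)

theorem pv_body (mirror : List String) (m : Int) (fa fb : Nat)
    (h0 : 0 ≤ m) (hfa : m.toNat ≤ fa) (hfb : m.toNat ≤ fb) :
    (if (PySem.List.slice (PySem.List.slice mirror none (some (m))).reverse none
        (some ((min (PySem.List.slice mirror none (some (m))).length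
                    (PySem.List.slice mirror (some (m)) none).length : Nat) : Int)) =
      PySem.List.slice (PySem.List.slice mirror (some (m)) none) none
        (some ((min (PySem.List.slice mirror none (some (m))).length
                    (PySem.List.slice mirror (some (m)) none).length : Nat) : Int)))
     then m else pvAGo mirror fa (some (m - 1)))
    = pvAltGoF mirror mirror.length fb m := by
  by_cases hm0 : m = 0
  · subst hm0
    rw [if_pos (pv_condA_zero mirror), pv_altF_nonpos mirror _ fb 0 le_rfl]
  · obtain ⟨g, rfl⟩ : ∃ g, fb = g + 1 := ⟨fb - 1, by omega⟩
    rw [pv_altF_succ mirror _ g m (by omega)]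
    by_cases hc : (PySem.List.slice (PySem.List.slice mirror none (some (m))).reverse none
        (some ((min (PySem.List.slice mirror none (some (m))).length
                    (PySem.List.slice mirror (some (m)) none).length : Nat) : Int)) =
      PySem.List.slice (PySem.List.slice mirror (some (m)) none) none
        (some ((min (PySem.List.slice mirror none (some (m))).length
                    (PySem.List.slice mirror (some (m)) none).length : Nat) : Int)))
    · rw [if_pos hc, if_pos ((pv_condA_eq_condB mirror m (by omega)).mp hc)]
    · rw [if_neg hc, if_neg (fun hb => hc ((pv_condA_eq_condB mirror m (by omega)).mpr hb))]
      exact pv_loopAB mirror (m - 1).toNat (m - 1) le_rfl fa g (by omega) (by omega) (by omega)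

theorem pv_main (mirror : List String) (middlepoint : Option Int)
    (hpre : 0 ≤ middlepoint.getD 0)
    (hd : ¬ (mirror = [] ∧ middlepoint = none)) :
    count_rows_above_reflection mirror middlepoint = count_rows_above_reflection_alt mirror middlepoint := by
  rcases middlepoint with _ | v
  · have hne : mirror ≠ [] := fun h => hd ⟨h, rfl⟩
    have hlen : 1 ≤ mirror.length := by
      cases mirror with
      | nil => exact absurd rfl hne
      | cons x xs => simp
    show pvAGo mirror (2 * mirror.length + 2) none
        = pvAltGoF mirror mirror.length ((mirror.length : Int) - 1).toNat ((mirror.length : Int) - 1)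
    rw [show 2 * mirror.length + 2 = (2 * mirror.length + 1) + 1 from rfl, pvAGo_none]
    exact pv_body mirror ((mirror.length : Int) - 1) (2 * mirror.length + 1)
      (((mirror.length : Int) - 1).toNat) (by omega) (by omega) le_rfl
  · simp only [Option.getD_some] at hpre
    by_cases hv : v = 0
    · subst hv
      show pvAGo mirror ((0 + (mirror.length : Int) + 1).toNat + 1) (some 0)
          = pvAltGoF mirror mirror.length ((0:Int)).toNat 0
      rw [pvAGo_zero_arg, pv_altF_nonpos mirror _ _ 0 le_rfl]
    · show pvAGo mirror ((v + (mirror.length : Int) + 1).toNat + 1) (some v)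
          = pvAltGoF mirror mirror.length v.toNat v
      rw [pvAGo_some mirror _ v hv]
      exact pv_body mirror v ((v + (mirror.length : Int) + 1).toNat) v.toNat (by omega) (by omega) le_rfl

-- ===== VERDICT (by name: the statement is the Claim_ definition above) =====
theorem count_rows_above_reflection_spec : Claim_unchanged_count_rows_above_reflection := by
  intro mirror middlepoint _ hpre
  unfold Spec_count_rows_above_reflection
  intro hd
  exact pv_main mirror middlepoint hpre (by intro h; exact hd h)

theorem count_rows_above_reflection_changed : Claim_changed_count_rows_above_reflection := by
  unfold Claim_changed_count_rows_above_reflection; decide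

theorem count_rows_above_reflection_tight : Claim_exact_count_rows_above_reflection := by
  intro mirror middlepoint _ _ hd
  obtain ⟨h1, h2⟩ := hd
  subst h1; subst h2
  decide
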